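-- pv_equiv track=rewrite | github.com/Tisha2-hub/impledge_technologies | 1.py | segregate_compound_words
-- ===== SOURCE A (Python) =====
-- def is_compound_word(word, words_set, memo):
--     if word in memo:
--         return memo[word]
--     for i in range(1, len(word)):
--         prefix = word[:i]
--         suffix = word[i:]
--         if prefix in words_set and (suffix in words_set or is_compound_word(suffix, words_set, memo)):
--             memo[word] = True
--             return True
--     memo[word] = False
--     return False
--
-- def segregate_compound_words(words):
--     words_set = set(words)
--     compound_words = []
--     simple_words = []
--     memo = {}
--     for word in words:
--         if is_compound_word(word, words_set, memo):
--             compound_words.append(word)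
--         else:
--             simple_words.append(word)
--     return compound_words, simple_words
-- ===== SOURCE B (Python) =====
-- def segregate_compound_words(words):
--     words_set = set(words)
--     compound_words = []
--     simple_words = []
--     for word in words:
--         n = len(word)
--         # seg[k]: word[k:] is a concatenation of >=1 dictionary words (seg[n]: empty tail)
--         seg = [False] * n + [True]
--         for i in range(n - 1, 0, -1):
--             seg[i] = any(word[i:j] in words_set and seg[j] for j in range(i + 1, n + 1))
--         if any(word[:i] in words_set and seg[i] for i in range(1, n)):
--             compound_words.append(word)
--         else:
--             simple_words.append(word)
--     return compound_words, simple_words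
-- ===== Notes on version B (the rewrite author's own statement) =====
-- stated objective: alternative
-- what changed: Replaces A's shared-memo top-down recursion over suffixes by a per-word bottom-up boolean reachability table (seg[i] = word[i:] splits into dictionary words), computed right-to-left, with compoundness read off as a proper prefix split.
import Mathlib
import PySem

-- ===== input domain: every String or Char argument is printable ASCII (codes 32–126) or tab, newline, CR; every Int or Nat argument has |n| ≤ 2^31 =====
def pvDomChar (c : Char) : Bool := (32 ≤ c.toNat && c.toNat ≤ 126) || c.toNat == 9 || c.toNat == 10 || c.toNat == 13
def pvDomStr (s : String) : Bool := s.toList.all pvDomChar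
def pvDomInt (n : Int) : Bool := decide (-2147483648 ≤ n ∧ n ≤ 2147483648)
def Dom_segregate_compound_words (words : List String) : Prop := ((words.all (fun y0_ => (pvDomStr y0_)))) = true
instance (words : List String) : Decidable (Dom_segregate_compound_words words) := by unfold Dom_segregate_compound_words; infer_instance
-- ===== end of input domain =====

-- B replaces A's shared-memo recursive splitter by a per-word right-to-left reachability DP table; alternative decomposition, not claimed faster.

-- ===== PORT A =====
-- Strings are handled as their List Char contents (PySem.Str functions are thin wrappers
-- over List Char); word[:i] / word[i:] are List.take / List.drop (exact: 0 ≤ i ≤ len).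
-- is_compound_word carries an explicit fuel (an upper bound on recursion depth, word.length
-- suffices; Python's recursion is unbounded) threading the memo dict exactly as A does.
mutual
def pvIsCompoundA (ws : PySem.Set (List Char)) : Nat → List Char → PySem.Dict (List Char) Bool → Bool × PySem.Dict (List Char) Bool
  | fuel, word, memo =>
    match memo.get? word with
    | some b => (b, memo)
    | none =>
      match fuel with
      | 0 => (false, memo)
      | f + 1 => pvLoopA ws f word (List.range' 1 (word.length - 1)) memo
termination_by fuel _ _ => (fuel, 0, 0)

-- the 'for i in range(1, len(word))' loop of is_compound_word, with A's early returns
def pvLoopA (ws : PySem.Set (List Char)) (fuel : Nat) (word : List Char) : List Nat → PySem.Dict (List Char) Bool → Bool × PySem.Dict (List Char) Bool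
  | [], memo => (false, memo.insert word false)
  | i :: rest, memo =>
    if ws.contains (word.take i) then
      if ws.contains (word.drop i) then (true, memo.insert word true)
      else
        let r := pvIsCompoundA ws fuel (word.drop i) memo
        if r.1 then (true, r.2.insert word true)
        else pvLoopA ws fuel word rest r.2
    else pvLoopA ws fuel word rest memo
termination_by is _ => (fuel, 1, is.length)
end

def segregate_compound_words (words : List String) : List String × List String :=
  let ws : PySem.Set (List Char) := PySem.Set.ofList (words.map String.toList)
  let r := words.foldl
    (fun (acc : List String × List String × PySem.Dict (List Char) Bool) word =>
      let p := pvIsCompoundA ws word.toList.length word.toList acc.2.2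
      if p.1 then (acc.1 ++ [word], acc.2.1, p.2) else (acc.1, acc.2.1 ++ [word], p.2))
    ([], [], PySem.Dict.empty)
  (r.1, r.2.1)

-- ===== PORT B =====
-- seg = [False]*n + [True]; for i in range(n-1, 0, -1): seg[i] = any(...)
-- range(n-1, 0, -1) is transliterated as (List.range' 1 (n-1)).reverse = [n-1, …, 1];
-- seg[j] is seg.getD j false (every read index is 1 ≤ j ≤ n < len seg, so exact).
def pvSegTable (ws : PySem.Set (List Char)) (w : List Char) : List Bool :=
  let n := w.length
  ((List.range' 1 (n - 1)).reverse).foldl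
    (fun seg i =>
      seg.set i ((List.range' (i + 1) (n - i)).any
        (fun j => ws.contains ((w.drop i).take (j - i)) && seg.getD j false)))
    (List.replicate n false ++ [true])

def pvIsCompoundB (ws : PySem.Set (List Char)) (w : List Char) : Bool :=
  let seg := pvSegTable ws w
  (List.range' 1 (w.length - 1)).any (fun i => ws.contains (w.take i) && seg.getD i false)

def segregate_compound_words_alt (words : List String) : List String × List String :=
  let ws : PySem.Set (List Char) := PySem.Set.ofList (words.map String.toList)
  words.foldl
    (fun acc word =>
      if pvIsCompoundB ws word.toList then (acc.1 ++ [word], acc.2) else (acc.1, acc.2 ++ [word]))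
    ([], [])

-- ===== PRECONDITION & SPEC =====
def Spec_segregate_compound_words (words : List String) (out : List String × List String) : Prop := out = segregate_compound_words_alt words
instance (words : List String) (out : List String × List String) : Decidable (Spec_segregate_compound_words words out) := by unfold Spec_segregate_compound_words; infer_instance

-- ===== CLAIM (what is proved, stated in full; the proofs are below) =====
def Claim_equal_segregate_compound_words : Prop := ∀ (words : List String), Dom_segregate_compound_words words → Spec_segregate_compound_words words (segregate_compound_words words)

-- ===== LEMMAS AND PROOFS =====

-- reference predicate: w splits as s ++ t, s in ws, t a concatenation of ≥ 1 ws-words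
def pvComp (ws : PySem.Set (List Char)) (w : List Char) : Bool :=
  (List.range' 1 (w.length - 1)).attach.any
    (fun i => ws.contains (w.take i.1) && (ws.contains (w.drop i.1) || pvComp ws (w.drop i.1)))
termination_by w.length
decreasing_by
  have h := List.mem_range'_1.mp i.2
  simp only [List.length_drop]
  omega

lemma pvComp_eq (ws : PySem.Set (List Char)) (w : List Char) :
    pvComp ws w = (List.range' 1 (w.length - 1)).any
      (fun i => ws.contains (w.take i) && (ws.contains (w.drop i) || pvComp ws (w.drop i))) := by
  rw [pvComp]
  simp only [List.any_subtype, List.unattach_attach]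

def pvSound (ws : PySem.Set (List Char)) (memo : PySem.Dict (List Char) Bool) : Prop :=
  ∀ k b, memo.get? k = some b → b = pvComp ws k

lemma pvComp_nil (ws : PySem.Set (List Char)) : pvComp ws [] = false := by
  rw [pvComp_eq]; simp

lemma pvSound_insert (ws : PySem.Set (List Char)) (memo : PySem.Dict (List Char) Bool)
    (h : pvSound ws memo) (w : List Char) (b : Bool) (hb : b = pvComp ws w) :
    pvSound ws (memo.insert w b) := by
  intro k v hv
  rw [PySem.Dict.get?_insert] at hv
  split at hv
  · cases hv; subst ‹k = w›; exact hb
  · exact h k v hv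

-- A's memoised recursion computes pvComp and keeps the memo sound
lemma pvLoopA_main (ws : PySem.Set (List Char)) (fuel : Nat)
    (hic : ∀ (w : List Char) memo, w.length ≤ fuel → pvSound ws memo →
      (pvIsCompoundA ws fuel w memo).1 = pvComp ws w ∧ pvSound ws (pvIsCompoundA ws fuel w memo).2) :
    ∀ (is : List Nat) (w : List Char) (memo : PySem.Dict (List Char) Bool),
      w.length ≤ fuel + 1 →
      (∀ i ∈ is, 1 ≤ i ∧ i < w.length) →
      pvSound ws memo →
      is.any (fun i => ws.contains (w.take i) && (ws.contains (w.drop i) || pvComp ws (w.drop i))) = pvComp ws w →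
      (pvLoopA ws fuel w is memo).1 = pvComp ws w ∧ pvSound ws (pvLoopA ws fuel w is memo).2 := by
  intro is
  induction is with
  | nil =>
    intro w memo hlen _ hmemo hany
    rw [pvLoopA]
    simp only [List.any_nil] at hany
    exact ⟨by simp [← hany], pvSound_insert ws memo hmemo w false hany⟩
  | cons i rest ih =>
    intro w memo hlen hmem hmemo hany
    rw [pvLoopA]
    simp only [List.any_cons] at hany
    by_cases hpre : ws.contains (w.take i) = true
    · rw [if_pos hpre]
      by_cases hsuf : ws.contains (w.drop i) = true
      · rw [if_pos hsuf]
        have hcw : pvComp ws w = true := by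
          rw [← hany, hpre, hsuf]; simp
        exact ⟨hcw.symm, pvSound_insert ws memo hmemo w true hcw.symm⟩
      · rw [if_neg hsuf]
        have hi := hmem i (List.mem_cons_self)
        have hsl : (w.drop i).length ≤ fuel := by
          simp only [List.length_drop]; omega
        have hrec := hic (w.drop i) memo hsl hmemo
        by_cases hb : (pvIsCompoundA ws fuel (w.drop i) memo).1 = true
        · simp only [hb, if_pos]
          have hcw : pvComp ws w = true := by
            rw [← hany, hpre]
            simp only [Bool.true_and]
            rw [← hrec.1, hb]
            simp
          exact ⟨hcw.symm, pvSound_insert ws _ hrec.2 w true hcw.symm⟩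
        · simp only [Bool.not_eq_true] at hb
          simp only [hb, Bool.false_eq_true, if_false]
          apply ih w _ hlen (fun x hx => hmem x (List.mem_cons_of_mem i hx)) hrec.2
          rw [← hany, hpre]
          simp only [Bool.true_and]
          simp only [Bool.not_eq_true] at hsuf
          rw [hsuf, ← hrec.1, hb]
          simp
    · rw [if_neg hpre]
      apply ih w memo hlen (fun x hx => hmem x (List.mem_cons_of_mem i hx)) hmemo
      rw [← hany]
      simp only [Bool.not_eq_true] at hpre
      rw [hpre]
      simp

lemma pvIsCompoundA_main (ws : PySem.Set (List Char)) :
    ∀ (fuel : Nat) (w : List Char) (memo : PySem.Dict (List Char) Bool),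
      w.length ≤ fuel → pvSound ws memo →
      (pvIsCompoundA ws fuel w memo).1 = pvComp ws w ∧ pvSound ws (pvIsCompoundA ws fuel w memo).2 := by
  intro fuel
  induction fuel with
  | zero =>
    intro w memo hlen hmemo
    have hw : w = [] := List.length_eq_zero_iff.mp (Nat.le_zero.mp hlen)
    rw [pvIsCompoundA]
    cases h : memo.get? w with
    | some b => exact ⟨by dsimp only; exact hmemo w b h, by dsimp only; exact hmemo⟩
    | none => exact ⟨by dsimp only; simp [hw, pvComp_nil], by dsimp only; exact hmemo⟩
  | succ f ih =>
    intro w memo hlen hmemo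
    rw [pvIsCompoundA]
    cases h : memo.get? w with
    | some b => exact ⟨by dsimp only; exact hmemo w b h, by dsimp only; exact hmemo⟩
    | none =>
      dsimp only
      apply pvLoopA_main ws f ih (List.range' 1 (w.length - 1)) w memo hlen
      · intro i hi
        have := List.mem_range'_1.mp hi
        omega
      · exact hmemo
      · exact (pvComp_eq ws w).symm

-- the value seg[j] holds at the end of B's DP loop (1 ≤ j ≤ n)
def pvS (ws : PySem.Set (List Char)) (w : List Char) (j : Nat) : Bool :=
  if j = w.length then true else ws.contains (w.drop j) || pvComp ws (w.drop j)

-- DP recurrence: the inner any over j computes pvS at position k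
lemma pvRec (ws : PySem.Set (List Char)) (w : List Char) (k : Nat) (hkn : k < w.length) :
    (List.range' (k + 1) (w.length - k)).any
      (fun j => ws.contains ((w.drop k).take (j - k)) && pvS ws w j)
    = (ws.contains (w.drop k) || pvComp ws (w.drop k)) := by
  rw [Bool.eq_iff_iff]
  rw [pvComp_eq ws (w.drop k)]
  simp only [List.any_eq_true, List.mem_range'_1, Bool.and_eq_true, Bool.or_eq_true,
    List.length_drop]
  constructor
  · rintro ⟨j, ⟨hj1, hj2⟩, hc, hS⟩
    by_cases hjn : j = w.length
    · left
      rwa [hjn, List.take_of_length_le (by simp only [List.length_drop]; omega)] at hc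
    · right
      refine ⟨j - k, ⟨by omega, by omega⟩, hc, ?_⟩
      have hdd : (w.drop k).drop (j - k) = w.drop j := by
        rw [List.drop_drop]; congr 1; omega
      simp only [pvS, if_neg hjn, Bool.or_eq_true] at hS
      rwa [hdd]
  · rintro (hc | ⟨i, ⟨hi1, hi2⟩, hc, hrest⟩)
    · refine ⟨w.length, ⟨by omega, by omega⟩, ?_, by simp [pvS]⟩
      rwa [List.take_of_length_le (by simp only [List.length_drop]; omega)]
    · refine ⟨k + i, ⟨by omega, by omega⟩, ?_, ?_⟩
      · have : k + i - k = i := by omega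
        rwa [this]
      · have hne : k + i ≠ w.length := by omega
        have hdd : (w.drop k).drop i = w.drop (k + i) := by
          rw [List.drop_drop]
        simp only [pvS, if_neg hne, Bool.or_eq_true]
        rwa [hdd] at hrest

lemma pvAnyCongr {α : Type} (l : List α) (f g : α → Bool) (h : ∀ x ∈ l, f x = g x) :
    l.any f = l.any g := by
  induction l with
  | nil => rfl
  | cons x xs ih =>
    simp only [List.any_cons, h x (List.mem_cons_self),
      ih (fun y hy => h y (List.mem_cons_of_mem x hy))]

lemma pvGetDSet (l : List Bool) (i j : Nat) (v : Bool) :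
    (l.set i v).getD j false = if j = i ∧ i < l.length then v else l.getD j false := by
  simp only [List.getD_eq_getElem?_getD, List.getElem?_set]
  split_ifs with h1 h2 h3 <;> simp_all

lemma pvTable_fold (ws : PySem.Set (List Char)) (w : List Char) :
    ∀ (k : Nat) (seg : List Bool), seg.length = w.length + 1 → k ≤ w.length - 1 →
      (∀ j, k < j → j ≤ w.length → seg.getD j false = pvS ws w j) →
      (((List.range' 1 k).reverse.foldl
          (fun seg i => seg.set i ((List.range' (i + 1) (w.length - i)).any
            (fun j => ws.contains ((w.drop i).take (j - i)) && seg.getD j false))) seg).length = w.length + 1) ∧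
      (∀ j, 1 ≤ j → j ≤ k →
        ((List.range' 1 k).reverse.foldl
          (fun seg i => seg.set i ((List.range' (i + 1) (w.length - i)).any
            (fun j => ws.contains ((w.drop i).take (j - i)) && seg.getD j false))) seg).getD j false = pvS ws w j) ∧
      (∀ j, k < j →
        ((List.range' 1 k).reverse.foldl
          (fun seg i => seg.set i ((List.range' (i + 1) (w.length - i)).any
            (fun j => ws.contains ((w.drop i).take (j - i)) && seg.getD j false))) seg).getD j false = seg.getD j false) := by
  intro k
  induction k with
  | zero =>
    intro seg hlen _ _
    refine ⟨by simpa using hlen, by omega, fun j _ => by simp⟩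
  | succ k ih =>
    intro seg hlen hk hup
    have hrange : (List.range' 1 (k + 1)).reverse = (k + 1) :: (List.range' 1 k).reverse := by
      rw [List.range'_concat]
      simp [Nat.add_comm]
    rw [hrange]
    simp only [List.foldl_cons]
    have hinner : (List.range' (k + 1 + 1) (w.length - (k + 1))).any
        (fun j => ws.contains ((w.drop (k + 1)).take (j - (k + 1))) && seg.getD j false)
        = pvS ws w (k + 1) := by
      rw [pvAnyCongr _ _ (fun j => ws.contains ((w.drop (k + 1)).take (j - (k + 1))) && pvS ws w j)
        (by
          intro j hj
          have hjb := List.mem_range'_1.mp hj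
          rw [hup j (by omega) (by omega)])]
      rw [pvRec ws w (k + 1) (by omega)]
      simp only [pvS, if_neg (by omega : ¬ (k + 1 = w.length))]
    have hlen' : ∀ v : Bool, (seg.set (k + 1) v).length = w.length + 1 := fun v => by
      simpa using hlen
    have hup' : ∀ j, k < j → j ≤ w.length →
        (seg.set (k + 1) ((List.range' (k + 1 + 1) (w.length - (k + 1))).any
          (fun j => ws.contains ((w.drop (k + 1)).take (j - (k + 1))) && seg.getD j false))).getD j false
        = pvS ws w j := by
      intro j hj1 hj2
      rw [pvGetDSet]
      by_cases hje : j = k + 1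
      · rw [if_pos ⟨hje, by omega⟩, hinner, hje]
      · rw [if_neg (by tauto)]
        exact hup j (by omega) hj2
    obtain ⟨l1, l2, l3⟩ := ih _ (hlen' _) (by omega) hup'
    refine ⟨l1, ?_, ?_⟩
    · intro j hj1 hj2
      by_cases hje : j = k + 1
      · rw [hje, l3 (k + 1) (by omega)]
        exact hup' (k + 1) (by omega) (by omega)
      · exact l2 j hj1 (by omega)
    · intro j hj
      rw [l3 j (by omega), pvGetDSet, if_neg (by omega)]

lemma pvSegTable_getD (ws : PySem.Set (List Char)) (w : List Char) (j : Nat) (h1 : 1 ≤ j) (h2 : j ≤ w.length) :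
    (pvSegTable ws w).getD j false = pvS ws w j := by
  have hn : 1 ≤ w.length := by omega
  have hlen0 : (List.replicate w.length false ++ [true]).length = w.length + 1 := by simp
  have hup0 : ∀ i, w.length - 1 < i → i ≤ w.length →
      (List.replicate w.length false ++ [true]).getD i false = pvS ws w i := by
    intro i hi1 hi2
    have hi : i = w.length := by omega
    subst hi
    rw [pvS, if_pos rfl]
    simp [List.getD_eq_getElem?_getD]
  obtain ⟨l1, l2, l3⟩ := pvTable_fold ws w (w.length - 1) _ hlen0 le_rfl hup0
  unfold pvSegTable
  by_cases hje : j = w.length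
  · rw [hje, l3 w.length (by omega), hup0 w.length (by omega) le_rfl]
  · exact l2 j h1 (by omega)

lemma pvIsCompoundB_eq (ws : PySem.Set (List Char)) (w : List Char) :
    pvIsCompoundB ws w = pvComp ws w := by
  unfold pvIsCompoundB
  rw [pvComp_eq]
  apply pvAnyCongr
  intro i hi
  have hib := List.mem_range'_1.mp hi
  rw [pvSegTable_getD ws w i (by omega) (by omega), pvS, if_neg (by omega)]

lemma pvFold_eq (ws : PySem.Set (List Char)) :
    ∀ (words : List String) (c s : List String) (memo : PySem.Dict (List Char) Bool),
      pvSound ws memo →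
      (let r := words.foldl
        (fun (acc : List String × List String × PySem.Dict (List Char) Bool) word =>
          let p := pvIsCompoundA ws word.toList.length word.toList acc.2.2
          if p.1 then (acc.1 ++ [word], acc.2.1, p.2) else (acc.1, acc.2.1 ++ [word], p.2))
        (c, s, memo)
       (r.1, r.2.1)) =
      words.foldl
        (fun acc word =>
          if pvIsCompoundB ws word.toList then (acc.1 ++ [word], acc.2) else (acc.1, acc.2 ++ [word]))
        (c, s) := by
  intro words
  induction words with
  | nil => intro c s memo _; rfl
  | cons word rest ih =>
    intro c s memo hmemo
    have h := pvIsCompoundA_main ws word.toList.length word.toList memo le_rfl hmemo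
    simp only [List.foldl_cons]
    by_cases hb : pvComp ws word.toList = true
    · have hbB : pvIsCompoundB ws word.toList = true := by rw [pvIsCompoundB_eq]; exact hb
      simp only [h.1, hb, hbB, if_true]
      exact ih (c ++ [word]) s _ h.2
    · simp only [Bool.not_eq_true] at hb
      have hbB : pvIsCompoundB ws word.toList = false := by rw [pvIsCompoundB_eq]; exact hb
      simp only [h.1, hb, hbB, Bool.false_eq_true, if_false]
      exact ih c (s ++ [word]) _ h.2

-- ===== VERDICT (by name: the statement is the Claim_ definition above) =====
theorem segregate_compound_words_spec : Claim_equal_segregate_compound_words := by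
  intro words _
  unfold Spec_segregate_compound_words segregate_compound_words segregate_compound_words_alt
  exact pvFold_eq _ words [] [] PySem.Dict.empty (by intro k b h; simp [PySem.Dict.get?_empty] at h)
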